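-- pv_equiv track=rewrite | github.com/fctr-id/okta-ai-agent | src/data/test_streamlined_pipeline.py | _semantic_operation_match
-- ===== SOURCE A (Python) =====
-- def _semantic_operation_match(endpoint_op: str, requested_op: str) -> bool:
--     """Semantic matching for operations with common aliases"""
--
--     # Direct match
--     if endpoint_op == requested_op:
--         return True
--
--     # Semantic aliases
--     operation_aliases = {
--         'list': ['search', 'get_all', 'find', 'query'],
--         'get': ['retrieve', 'show', 'read', 'fetch'],
--         'create': ['add', 'new', 'post'],
--         'update': ['modify', 'edit', 'change', 'put', 'patch'],
--         'delete': ['remove', 'destroy'],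
--         'assign': ['add_to', 'attach'],
--         'unassign': ['remove_from', 'detach']
--     }
--
--     # Check if endpoint operation is an alias of requested operation
--     for main_op, aliases in operation_aliases.items():
--         if requested_op == main_op and endpoint_op in aliases:
--             return True
--         if endpoint_op == main_op and requested_op in aliases:
--             return True
--
--     return False
-- ===== SOURCE B (Python) =====
-- # Flat precomputed alias->main table; match is three O(1) lookups, no loop.
-- _ALIAS_TO_MAIN = {
--     'search': 'list', 'get_all': 'list', 'find': 'list', 'query': 'list',
--     'retrieve': 'get', 'show': 'get', 'read': 'get', 'fetch': 'get',
--     'add': 'create', 'new': 'create', 'post': 'create',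
--     'modify': 'update', 'edit': 'update', 'change': 'update', 'put': 'update', 'patch': 'update',
--     'remove': 'delete', 'destroy': 'delete',
--     'add_to': 'assign', 'attach': 'assign',
--     'remove_from': 'unassign', 'detach': 'unassign',
-- }
--
-- def _semantic_operation_match(endpoint_op: str, requested_op: str) -> bool:
--     return (endpoint_op == requested_op
--             or _ALIAS_TO_MAIN.get(endpoint_op) == requested_op
--             or _ALIAS_TO_MAIN.get(requested_op) == endpoint_op)
-- ===== Notes on version B (the rewrite author's own statement) =====
-- stated objective: idiomatic
-- what changed: Replaces A's bidirectional loop over the main->aliases table with a single precomputed flat alias->main dict and three loop-free O(1) lookups (direct equality, alias(endpoint)==requested, alias(requested)==endpoint).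
import Mathlib
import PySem

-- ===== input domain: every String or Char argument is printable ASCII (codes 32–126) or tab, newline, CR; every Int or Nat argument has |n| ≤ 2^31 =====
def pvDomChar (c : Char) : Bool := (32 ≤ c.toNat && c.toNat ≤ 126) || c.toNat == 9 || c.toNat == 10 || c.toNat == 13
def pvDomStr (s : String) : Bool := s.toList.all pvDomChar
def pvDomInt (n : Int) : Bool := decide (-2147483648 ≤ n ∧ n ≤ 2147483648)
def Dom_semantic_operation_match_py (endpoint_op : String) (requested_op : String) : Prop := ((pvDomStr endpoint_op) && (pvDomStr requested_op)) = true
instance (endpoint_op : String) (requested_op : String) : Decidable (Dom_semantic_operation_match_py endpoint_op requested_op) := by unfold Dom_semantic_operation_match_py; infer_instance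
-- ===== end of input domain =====

-- B replaces A's bidirectional scan over the alias table with three lookups in a
-- precomputed flat alias→main dict (objective: idiomatic / loop-free match).

-- ===== PORT A =====
def pvAliasTable : List (String × List String) :=
  [("list", ["search", "get_all", "find", "query"]),
   ("get", ["retrieve", "show", "read", "fetch"]),
   ("create", ["add", "new", "post"]),
   ("update", ["modify", "edit", "change", "put", "patch"]),
   ("delete", ["remove", "destroy"]),
   ("assign", ["add_to", "attach"]),
   ("unassign", ["remove_from", "detach"])]

-- the `for main_op, aliases in operation_aliases.items()` loop with its early returns
def pvScan (endpoint_op requested_op : String) : List (String × List String) → Bool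
  | [] => false
  | (main_op, als) :: rest =>
    if requested_op == main_op && als.contains endpoint_op then true
    else if endpoint_op == main_op && als.contains requested_op then true
    else pvScan endpoint_op requested_op rest

def semantic_operation_match_py (endpoint_op : String) (requested_op : String) : Bool :=
  if endpoint_op == requested_op then true
  else pvScan endpoint_op requested_op pvAliasTable

-- ===== PORT B =====
def pvAliasToMain : PySem.Dict String String :=
  PySem.Dict.ofList [("search", "list"),
    ("get_all", "list"),
    ("find", "list"),
    ("query", "list"),
    ("retrieve", "get"),
    ("show", "get"),
    ("read", "get"),
    ("fetch", "get"),
    ("add", "create"),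
    ("new", "create"),
    ("post", "create"),
    ("modify", "update"),
    ("edit", "update"),
    ("change", "update"),
    ("put", "update"),
    ("patch", "update"),
    ("remove", "delete"),
    ("destroy", "delete"),
    ("add_to", "assign"),
    ("attach", "assign"),
    ("remove_from", "unassign"),
    ("detach", "unassign")]

def semantic_operation_match_py_alt (endpoint_op : String) (requested_op : String) : Bool :=
  endpoint_op == requested_op
  || pvAliasToMain.get? endpoint_op == some requested_op
  || pvAliasToMain.get? requested_op == some endpoint_op


-- ===== PRECONDITION & SPEC =====
def Spec_semantic_operation_match_py (endpoint_op : String) (requested_op : String) (out : Bool) : Prop := out = semantic_operation_match_py_alt endpoint_op requested_op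
instance (endpoint_op : String) (requested_op : String) (out : Bool) : Decidable (Spec_semantic_operation_match_py endpoint_op requested_op out) := by unfold Spec_semantic_operation_match_py; infer_instance

-- ===== CLAIM (what is proved, stated in full; the proofs are below) =====
def Claim_equal_semantic_operation_match_py : Prop := ∀ (endpoint_op : String) (requested_op : String), Dom_semantic_operation_match_py endpoint_op requested_op → Spec_semantic_operation_match_py endpoint_op requested_op (semantic_operation_match_py endpoint_op requested_op)

-- ===== LEMMAS AND PROOFS =====

-- first-match lookup in an association list (how the flat dict answers .get)
def pvAlook : List (String × String) → String → Option String
  | [], _ => none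
  | (a, m) :: t, x => if a == x then some m else pvAlook t x

-- flatten the alias table into (alias, main) pairs
def pvFlatten : List (String × List String) → List (String × String)
  | [] => []
  | (m, als) :: t => als.map (fun a => (a, m)) ++ pvFlatten t

theorem pvAlook_append (l₁ l₂ : List (String × String)) (x : String) :
    pvAlook (l₁ ++ l₂) x = (pvAlook l₁ x).or (pvAlook l₂ x) := by
  induction l₁ with
  | nil => simp [pvAlook]
  | cons p t ih =>
      obtain ⟨a, m⟩ := p
      by_cases h : a = x
      · simp [pvAlook, h]
      · simp [pvAlook, h, ih]

theorem pvAlook_map (als : List String) (m x : String) :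
    pvAlook (als.map (fun a => (a, m))) x = if x ∈ als then some m else none := by
  induction als with
  | nil => simp [pvAlook]
  | cons a t ih =>
      by_cases h : a = x
      · simp [pvAlook, h]
      · have hx : ¬ x = a := fun hh => h hh.symm
        simp [pvAlook, h, hx, ih]

theorem pvAlook_none (l : List (String × String)) (x : String)
    (h : ∀ p ∈ l, p.1 ≠ x) : pvAlook l x = none := by
  induction l with
  | nil => rfl
  | cons p t ih =>
      obtain ⟨a, m⟩ := p
      have ha : a ≠ x := h (a, m) (List.mem_cons_self ..)
      simp [pvAlook, ha]
      exact ih fun q hq => h q (List.mem_cons_of_mem _ hq)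

theorem pvAlook_values (l : List (String × String)) (x v : String)
    (h : pvAlook l x = some v) : v ∈ l.map Prod.snd := by
  induction l with
  | nil => simp [pvAlook] at h
  | cons p t ih =>
      obtain ⟨a, m⟩ := p
      simp only [pvAlook] at h
      split at h
      · injection h with h'
        subst h'
        simp
      · simp [ih h]

theorem pvScan_false (t : List (String × List String)) (e r : String)
    (h : ∀ p ∈ t, e ≠ p.1 ∧ e ∉ p.2) : pvScan e r t = false := by
  induction t with
  | nil => rfl
  | cons p t ih =>
      obtain ⟨m, als⟩ := p
      have h1 := h (m, als) (List.mem_cons_self ..)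
      simp [pvScan, h1.1, h1.2]
      exact ih fun q hq => h q (List.mem_cons_of_mem _ hq)

-- every key of the flat list is an alias of some table entry, its value that entry's main
theorem pvFlatten_mem (T : List (String × List String)) (p : String × String)
    (h : p ∈ pvFlatten T) : ∃ q ∈ T, p.2 = q.1 ∧ p.1 ∈ q.2 := by
  induction T with
  | nil => simp [pvFlatten] at h
  | cons hd t ih =>
      obtain ⟨m, als⟩ := hd
      simp only [pvFlatten, List.mem_append, List.mem_map] at h
      rcases h with ⟨a, ha, rfl⟩ | h
      · exact ⟨(m, als), List.mem_cons_self .., rfl, ha⟩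
      · obtain ⟨q, hq, h1, h2⟩ := ih h
        exact ⟨q, List.mem_cons_of_mem _ hq, h1, h2⟩

-- the central bridge: A's bidirectional table scan equals the two flat-dict lookups,
-- provided aliases are globally distinct, mains are distinct, and no main is an alias
theorem pvScan_eq (T : List (String × List String)) (e r : String)
    (H1 : ∀ p ∈ T, ∀ q ∈ T, p.1 ∉ q.2)
    (H2 : (T.map Prod.fst).Nodup)
    (H3 : (T.flatMap Prod.snd).Nodup) :
    pvScan e r T = (pvAlook (pvFlatten T) e == some r || pvAlook (pvFlatten T) r == some e) := by
  induction T with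
  | nil => simp [pvScan, pvFlatten, pvAlook]
  | cons hd t ih =>
      obtain ⟨m, als⟩ := hd
      have hmem : (m, als) ∈ (m, als) :: t := List.mem_cons_self ..
      have H1t : ∀ p ∈ t, ∀ q ∈ t, p.1 ∉ q.2 :=
        fun p hp q hq => H1 p (List.mem_cons_of_mem _ hp) q (List.mem_cons_of_mem _ hq)
      have H2' : (m :: t.map Prod.fst).Nodup := H2
      have H2c := List.nodup_cons.mp H2'
      have H3' : (als ++ t.flatMap Prod.snd).Nodup := H3
      have H3c := List.nodup_append.mp H3' 
      have H1h : ∀ q ∈ (m, als) :: t, m ∉ q.2 := fun q hq => H1 (m, als) hmem q hq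
      -- an element of als is not a key of pvFlatten t
      have hfresh : ∀ x ∈ als, ∀ p ∈ pvFlatten t, p.1 ≠ x := by
        intro x hx p hp hpx
        obtain ⟨q, hq, _, hkey⟩ := pvFlatten_mem t p hp
        have hmem2 : x ∈ t.flatMap Prod.snd := by
          rw [hpx] at hkey
          exact List.mem_flatMap.mpr ⟨q, hq, hkey⟩
        exact H3c.2.2 x hx x hmem2 rfl
      -- a value of pvFlatten t is a main of t
      have hvals : ∀ x v, pvAlook (pvFlatten t) x = some v → v ∈ t.map Prod.fst := by
        intro x v hv
        obtain ⟨p, hp, hpv⟩ := List.mem_map.mp (pvAlook_values (pvFlatten t) x v hv)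
        obtain ⟨q, hq, hq2, _⟩ := pvFlatten_mem t p hp
        exact List.mem_map.mpr ⟨q, hq, by rw [← hq2, hpv]⟩
      simp only [pvScan, pvFlatten, pvAlook_append, pvAlook_map]
      by_cases hea : e ∈ als
      · -- e is an alias of m
        have hem : e ≠ m := fun h => H1h (m, als) hmem (h ▸ hea)
        have henotkey : pvAlook (pvFlatten t) e = none :=
          pvAlook_none _ _ (fun p hp => hfresh e hea p hp)
        by_cases hrm : r = m
        · simp [hea, hrm]
        · have hrm' : ¬ (m == r) := by simpa using fun h => hrm h.symm
          by_cases hra : r ∈ als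
          · -- both aliases of m: no match anywhere
            have hrnotkey : pvAlook (pvFlatten t) r = none :=
              pvAlook_none _ _ (fun p hp => hfresh r hra p hp)
            have hscan : pvScan e r t = false := by
              apply pvScan_false
              intro p hp
              constructor
              · intro h
                exact H1 p (List.mem_cons_of_mem _ hp) (m, als) hmem (h ▸ hea)
              · intro h
                exact H3c.2.2 e hea e (List.mem_flatMap.mpr ⟨p, hp, h⟩) rfl
            simp [hea, hra, hrm, hem.symm, hem, hrnotkey, hscan, hrm']
          · have hrhs := ih H1t H2c.2 H3c.2.1
            simp [hea, hra, hrm, henotkey, hrhs, hrm']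
      · -- e is not an alias of m
        by_cases hem : e = m
        · subst hem
          -- e IS the main of this entry
          have henotkey : pvAlook (pvFlatten t) e = none := by
            apply pvAlook_none
            intro p hp hpx
            obtain ⟨q, hq, _, hkey⟩ := pvFlatten_mem t p hp
            exact H1h q (List.mem_cons_of_mem _ hq) (hpx ▸ hkey)
          by_cases hra : r ∈ als
          · simp [hea, hra]
          · have hrnotmain : ∀ v, pvAlook (pvFlatten t) r = some v → v ≠ e := by
              intro v hv hve
              exact H2c.1 (hve ▸ hvals r v hv)
            have hscan : pvScan e r t = false := by
              apply pvScan_false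
              intro p hp
              constructor
              · intro h
                exact H2c.1 (by rw [h]; exact List.mem_map.mpr ⟨p, hp, rfl⟩)
              · intro h
                exact H1h p (List.mem_cons_of_mem _ hp) h
            have hrl : (pvAlook (pvFlatten t) r == some e) = false := by
              cases hv : pvAlook (pvFlatten t) r with
              | none => simp
              | some v => simpa using hrnotmain v hv
            simp [hea, hra, henotkey, hscan, hrl]
        · -- e neither alias nor main of the head entry
          by_cases hra : r ∈ als
          · -- r is an alias of m, e unrelated to this entry
            have hrm : r ≠ m := fun h => H1h (m, als) hmem (h ▸ hra)
            have hrnotkey : pvAlook (pvFlatten t) r = none :=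
              pvAlook_none _ _ (fun p hp => hfresh r hra p hp)
            have her : (pvAlook (pvFlatten t) e == some r) = false := by
              cases hv : pvAlook (pvFlatten t) e with
              | none => simp
              | some v =>
                  have hvm : v ≠ r := by
                    intro hvr
                    obtain ⟨q, hq, hq1⟩ := List.mem_map.mp (hvals e v hv)
                    exact H1 q (List.mem_cons_of_mem _ hq) (m, als) hmem (by rw [hq1, hvr]; exact hra)
                  simpa using hvm
            have hrhs := ih H1t H2c.2 H3c.2.1
            simp [hea, hra, hem, hrnotkey, her, hrhs, Ne.symm hem]
          · -- neither e nor r touches the head entry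
            have hrhs := ih H1t H2c.2 H3c.2.1
            simp [hea, hra, hrhs]

theorem pv_get_alook (l : List (String × String)) (x : String) :
    (PySem.Dict.mk l).get? x = pvAlook l x := by
  induction l with
  | nil => rfl
  | cons p t ih =>
      obtain ⟨a, m⟩ := p
      rw [PySem.Dict.get?_mk_cons]
      simp [pvAlook, ih]

-- the dict Source B builds is exactly the flattened alias table
theorem pv_dict_flat : pvAliasToMain = PySem.Dict.mk (pvFlatten pvAliasTable) := by decide

theorem pv_key (e r : String) : semantic_operation_match_py e r = semantic_operation_match_py_alt e r := by
  have hg : ∀ s, pvAliasToMain.get? s = pvAlook (pvFlatten pvAliasTable) s := by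
    intro s
    rw [pv_dict_flat, pv_get_alook]
  by_cases h : e = r
  · simp [semantic_operation_match_py, semantic_operation_match_py_alt, h]
  · have hs := pvScan_eq pvAliasTable e r (by decide) (by decide) (by decide)
    have hbe : (e == r) = false := by simpa using h
    simp [semantic_operation_match_py, semantic_operation_match_py_alt, hbe, hg, hs]

-- ===== VERDICT (by name: the statement is the Claim_ definition above) =====
theorem semantic_operation_match_py_spec : Claim_equal_semantic_operation_match_py := by
  intro e r _
  unfold Spec_semantic_operation_match_py
  exact pv_key e r
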